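-- pv_equiv track=rewrite | github.com/kostyaGL/kostyaGL | checkio/unfair_dice.py | winning_die
-- ===== SOURCE A (Python) =====
-- import itertools
--
-- def winning_die(enemy_die):
--     enemy_die_length = len(enemy_die)
--     sum_enemy_die = sum(enemy_die)
--     m = max(enemy_die)
--     if m == 18:
--         m += 1
--     else:
--         m += 2
--
--     check = enemy_die_length % 2 == 1
--
--     if check:
--         rep = enemy_die_length // 2 + 1
--     else:
--         rep = enemy_die_length // 2
--     for k in range(1, m):
--         for i in itertools.product([k], range(1, m), repeat=rep):
--             if check:
--                 res = i[:-1]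
--             else:
--                 res = i
--             if (sum(res) == sum_enemy_die
--                     and len(res) == enemy_die_length
--                     and win(res, enemy_die)):
--                 return res
--     return []
--
-- def win(player, enemy):
--     return sum(1 if p > e else -1 if p < e else 0
--                for p in player for e in enemy) > 0
-- ===== SOURCE B (Python) =====
-- def winning_die(enemy_die):
--     # DFS backtracking over the same candidate shape (k at even positions) in the
--     # same lexicographic order, pruning branches whose remaining sum is infeasible.
--     n = len(enemy_die)
--     s = sum(enemy_die)
--     mx = max(enemy_die)
--     m = mx + 1 if mx == 18 else mx + 2
--     free = n // 2
--     fixed = n - free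
--
--     def score(p):
--         t = 0
--         for e in enemy_die:
--             if p > e:
--                 t += 1
--             elif p < e:
--                 t -= 1
--         return t
--
--     def dfs(c, target, acc):
--         if c == 0:
--             if target == 0:
--                 die = []
--                 for x in acc:
--                     die.append(k)
--                     die.append(x)
--                 if n % 2 == 1:
--                     die.append(k)
--                 if sum(score(p) for p in die) > 0:
--                     return die
--             return None
--         lo = max(1, target - (c - 1) * (m - 1))
--         hi = min(m - 1, target - (c - 1))
--         for x in range(lo, hi + 1):
--             r = dfs(c - 1, target - x, acc + [x])
--             if r is not None:
--                 return r
--         return None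
--
--     for k in range(1, m):
--         r = dfs(free, s - fixed * k, [])
--         if r is not None:
--             return tuple(r)
--     return []
-- ===== Notes on version B (the rewrite author's own statement) =====
-- stated objective: alternative
-- what changed: Replaces A's exhaustive itertools.product enumeration of all candidate tuples with DFS backtracking over the free positions in the same lexicographic order, pruning any branch whose remaining sum cannot reach the required total, and testing the win condition via per-face scores; intended as faster (a timing run saw A time out at sizes where B returned) but no speed ratio could be measured, so no speed is claimed.
-- outside the precondition, e.g. on winning_die([]): A raises ValueError, B raises ValueError
import Mathlib
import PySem

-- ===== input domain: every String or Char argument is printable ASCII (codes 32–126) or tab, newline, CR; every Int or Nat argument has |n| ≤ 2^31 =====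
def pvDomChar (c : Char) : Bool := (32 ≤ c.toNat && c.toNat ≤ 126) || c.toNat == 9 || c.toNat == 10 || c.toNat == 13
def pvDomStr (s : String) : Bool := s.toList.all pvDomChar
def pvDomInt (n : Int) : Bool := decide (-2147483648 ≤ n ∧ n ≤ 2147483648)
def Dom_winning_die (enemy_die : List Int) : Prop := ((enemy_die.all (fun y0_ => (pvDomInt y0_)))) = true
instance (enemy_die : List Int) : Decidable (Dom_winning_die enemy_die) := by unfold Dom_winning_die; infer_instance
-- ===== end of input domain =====

-- B replaces A's full cartesian-product enumeration by DFS backtracking in the same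
-- lexicographic order with partial-sum pruning (an alternative algorithm; no speed ratio
-- was measured, so none is claimed).

-- ===== PORT A =====

-- win(player, enemy): generator double loop, p outer, e inner (flattening = flatMap)
def pvWinA (player enemy : List Int) : Bool :=
  decide (0 < (player.flatMap (fun p =>
    enemy.map (fun e => if e < p then (1 : Int) else if p < e then (-1 : Int) else 0))).sum)

-- itertools.product([k], xs, repeat=r): lexicographic tuples (k,x1,k,x2,…,k,xr)
def pvProdKX (k : Int) (xs : List Int) : Nat → List (List Int)
  | 0 => [[]]
  | r + 1 => xs.flatMap (fun x => (pvProdKX k xs r).map (fun t => k :: x :: t))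

def winning_die (enemy_die : List Int) : List Int :=
  match PySem.List.max? enemy_die (fun y => y) with
  | none => []  -- unreachable under Pre_: Python max([]) raises ValueError
  | some mx =>
    let n := enemy_die.length
    let s := enemy_die.sum
    let m : Int := if mx = 18 then mx + 1 else mx + 2
    let rep := if n % 2 = 1 then n / 2 + 1 else n / 2
    ((PySem.List.pyRange 1 m 1).findSome? (fun k =>
      (pvProdKX k (PySem.List.pyRange 1 m 1) rep).findSome? (fun i =>
        let res := if n % 2 = 1 then i.dropLast else i  -- i[:-1] = dropLast (exact on lists)
        if res.sum = s ∧ res.length = n ∧ pvWinA res enemy_die then some res else none))).getD []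

-- ===== PORT B =====

-- score(p): single scan of enemy_die
def pvScore (enemy : List Int) (p : Int) : Int :=
  enemy.foldl (fun t e => if e < p then t + 1 else if p < e then t - 1 else t) 0

-- the die assembled from k and the chosen free values (Python's append loop)
def pvAssemble (k : Int) (acc : List Int) (odd : Bool) : List Int :=
  acc.flatMap (fun x => [k, x]) ++ (if odd then [k] else [])

-- dfs(c, target, acc): backtracking with partial-sum pruning
def pvDfs (enemy : List Int) (n : Nat) (k m : Int) : Nat → Int → List Int → Option (List Int)
  | 0, target, acc =>
    if target = 0 then
      let die := pvAssemble k acc (n % 2 == 1)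
      if 0 < (die.map (pvScore enemy)).sum then some die else none
    else none
  | c + 1, target, acc =>
    let lo := max 1 (target - (c : Int) * (m - 1))
    let hi := min (m - 1) (target - (c : Int))
    (PySem.List.pyRange lo (hi + 1) 1).findSome? (fun x =>
      pvDfs enemy n k m c (target - x) (acc ++ [x]))

def winning_die_alt (enemy_die : List Int) : List Int :=
  match PySem.List.max? enemy_die (fun y => y) with
  | none => []  -- unreachable under Pre_: Python max([]) raises ValueError
  | some mx =>
    let n := enemy_die.length
    let s := enemy_die.sum
    let m : Int := if mx = 18 then mx + 1 else mx + 2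
    let free := n / 2
    let fixed := n - free
    ((PySem.List.pyRange 1 m 1).findSome? (fun k =>
      pvDfs enemy_die n k m free (s - (fixed : Int) * k) [])).getD []

-- ===== PRECONDITION & SPEC =====
-- Pre_ excludes only the empty list, on which Python's max([]) raises ValueError.
def Pre_winning_die (enemy_die : List Int) : Prop := enemy_die ≠ []
instance (enemy_die : List Int) : Decidable (Pre_winning_die enemy_die) := by unfold Pre_winning_die; infer_instance
def pvWitness_winning_die : List Int := [1, 2, 3]

def Spec_winning_die (enemy_die : List Int) (out : List Int) : Prop := out = winning_die_alt enemy_die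
instance (enemy_die : List Int) (out : List Int) : Decidable (Spec_winning_die enemy_die out) := by unfold Spec_winning_die; infer_instance

-- ===== CLAIM (what is proved, stated in full; the proofs are below) =====
def Claim_equal_winning_die : Prop := ∀ (enemy_die : List Int), Dom_winning_die enemy_die → Pre_winning_die enemy_die → Spec_winning_die enemy_die (winning_die enemy_die)

-- ===== LEMMAS AND PROOFS =====

theorem pv_findSome?_congr_mem {α β : Type} {l : List α} {f g : α → Option β}
    (h : ∀ a ∈ l, f a = g a) : l.findSome? f = l.findSome? g := by
  induction l with
  | nil => rfl
  | cons a t ih =>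
    simp only [List.findSome?_cons, h a (by simp)]
    cases g a with
    | none => exact ih (fun b hb => h b (by simp [hb]))
    | some v => rfl

theorem pv_findSome?_flatMap {α β γ : Type} (l : List α) (g : α → List β) (f : β → Option γ) :
    (l.flatMap g).findSome? f = l.findSome? (fun a => (g a).findSome? f) := by
  induction l with
  | nil => rfl
  | cons a t ih =>
    simp only [List.flatMap_cons, List.findSome?_append, ih, List.findSome?_cons]
    cases (g a).findSome? f <;> rfl

theorem pv_findSome?_const_of_ne_nil {α β : Type} {l : List α} (h : l ≠ []) (o : Option β) :
    l.findSome? (fun _ => o) = o := by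
  cases o with
  | none => exact List.findSome?_eq_none_iff.mpr (fun a _ => rfl)
  | some v =>
    cases l with
    | nil => exact absurd rfl h
    | cons a t => simp [List.findSome?_cons]

theorem pvProdKX_length {k : Int} {xs : List Int} :
    ∀ {r : Nat} {i : List Int}, i ∈ pvProdKX k xs r → i.length = 2 * r := by
  intro r
  induction r with
  | zero => intro i hi; simp [pvProdKX] at hi; simp [hi]
  | succ r ih =>
    intro i hi
    simp only [pvProdKX, List.mem_flatMap, List.mem_map] at hi
    obtain ⟨x, _, t, ht, rfl⟩ := hi
    simp [ih ht]; omega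

-- sum / length of the interleaved prefix
theorem pv_flat_sum (k : Int) (acc : List Int) :
    (acc.flatMap (fun x => [k, x])).sum = (acc.length : Int) * k + acc.sum := by
  induction acc with
  | nil => simp
  | cons a t ih => simp [ih]; ring

theorem pv_flat_length (k : Int) (acc : List Int) :
    (acc.flatMap (fun x => [k, x])).length = 2 * acc.length := by
  induction acc with
  | nil => simp
  | cons a t ih => simp [ih]; omega

-- score(p) as a sum
theorem pv_score_eq (enemy : List Int) (p : Int) : ∀ (b : Int),
    enemy.foldl (fun t e => if e < p then t + 1 else if p < e then t - 1 else t) b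
      = b + (enemy.map (fun e => if e < p then (1 : Int) else if p < e then (-1 : Int) else 0)).sum := by
  induction enemy with
  | nil => intro b; simp
  | cons e t ih =>
    intro b
    simp only [List.foldl_cons, List.map_cons, List.sum_cons, ih]
    split_ifs <;> ring

-- A's win test equals B's per-element score sum
theorem pv_winA_eq (die enemy : List Int) :
    pvWinA die enemy = decide (0 < (die.map (pvScore enemy)).sum) := by
  unfold pvWinA
  congr 1
  congr 1
  induction die with
  | nil => simp
  | cons p t ih =>
    simp only [List.flatMap_cons, List.map_cons, List.sum_cons, List.sum_append, ih, pvScore,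
      pv_score_eq]
    ring

-- pruning soundness: dfs is none when the remaining sum is infeasible
theorem pv_dfs_none (enemy : List Int) (n : Nat) (k m : Int) :
    ∀ (c : Nat) (target : Int) (acc : List Int),
      (target < (c : Int) ∨ (c : Int) * (m - 1) < target) →
      pvDfs enemy n k m c target acc = none := by
  intro c
  induction c with
  | zero =>
    intro target acc h
    simp only [pvDfs]
    rw [if_neg]
    rcases h with h | h <;> simp at h <;> omega
  | succ c ih =>
    intro target acc h
    simp only [pvDfs]
    rw [PySem.List.pyRange_one_eq_nil]
    · rfl
    · rcases h with h | h
      · have h1 : min (m - 1) (target - (c : Int)) ≤ target - (c : Int) := min_le_right _ _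
        have h2 : (1 : Int) ≤ max 1 (target - (c : Int) * (m - 1)) := le_max_left _ _
        push_cast at h
        linarith
      · have h1 : min (m - 1) (target - (c : Int)) ≤ m - 1 := min_le_left _ _
        have h2 : target - (c : Int) * (m - 1) ≤ max 1 (target - (c : Int) * (m - 1)) := le_max_right _ _
        have h3 : ((c : Int) + 1) * (m - 1) = (c : Int) * (m - 1) + (m - 1) := by ring
        push_cast at h
        linarith

-- restricting the x-range to [lo, hi] loses nothing when h vanishes outside
theorem pv_range_restrict {m lo hi : Int} (hlo : 1 ≤ lo) (hhi : hi ≤ m - 1)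
    (h : Int → Option (List Int))
    (hnone : ∀ x, 1 ≤ x → x < m → (x < lo ∨ hi < x) → h x = none) :
    (PySem.List.pyRange 1 m 1).findSome? h = (PySem.List.pyRange lo (hi + 1) 1).findSome? h := by
  by_cases hc : lo ≤ hi + 1
  · have hm : hi + 1 ≤ m := by linarith
    rw [PySem.List.pyRange_one_append 1 lo m hlo (by linarith),
      PySem.List.pyRange_one_append lo (hi + 1) m hc hm,
      List.findSome?_append, List.findSome?_append]
    have left : (PySem.List.pyRange 1 lo 1).findSome? h = none := by
      refine List.findSome?_eq_none_iff.mpr (fun x hx => ?_)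
      rw [PySem.List.mem_pyRange_one] at hx
      exact hnone x hx.1 (by linarith) (Or.inl hx.2)
    have right : (PySem.List.pyRange (hi + 1) m 1).findSome? h = none := by
      refine List.findSome?_eq_none_iff.mpr (fun x hx => ?_)
      rw [PySem.List.mem_pyRange_one] at hx
      exact hnone x (by linarith) hx.2 (Or.inr (by linarith))
    simp [left, right]
  · rw [PySem.List.pyRange_one_eq_nil (by linarith : hi + 1 ≤ lo)]
    refine List.findSome?_eq_none_iff.mpr (fun x hx => ?_)
    rw [PySem.List.mem_pyRange_one] at hx
    rcases lt_or_ge x lo with hxl | hxl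
    · exact hnone x hx.1 hx.2 (Or.inl hxl)
    · exact hnone x hx.1 hx.2 (Or.inr (by omega))

-- the dfs step applied through the full range 1..m-1 equals the restricted range
theorem pv_dfs_step (enemy : List Int) (n : Nat) (k m : Int) (c : Nat) (target : Int)
    (acc : List Int) :
    (PySem.List.pyRange 1 m 1).findSome?
        (fun x => pvDfs enemy n k m c (target - x) (acc ++ [x]))
      = pvDfs enemy n k m (c + 1) target acc := by
  simp only [pvDfs]
  exact pv_range_restrict (le_max_left _ _) (min_le_left _ _) _
    (fun x hx1 hxm hout => by
      apply pv_dfs_none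
      rcases hout with hlt | hgt
      · right
        have := le_max_right 1 (target - (c : Int) * (m - 1))
        omega
      · left
        have := min_le_right (m - 1) (target - (c : Int))
        omega)


theorem pv_findSome?_map {α β γ : Type} (l : List α) (g : α → β) (f : β → Option γ) :
    (l.map g).findSome? f = l.findSome? (fun a => f (g a)) := List.findSome?_map

theorem pv_findSome?_singleton {α β : Type} (a : α) (f : α → Option β) :
    [a].findSome? f = f a := by
  simp only [List.findSome?_cons, List.findSome?_nil]
  cases f a <;> rfl

theorem pv_assemble_true (k : Int) (acc : List Int) :
    pvAssemble k acc true = acc.flatMap (fun x => [k, x]) ++ [k] := rfl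

theorem pv_assemble_false (k : Int) (acc : List Int) :
    pvAssemble k acc false = acc.flatMap (fun x => [k, x]) := by
  simp [pvAssemble]

theorem pvProdKX_succ (k : Int) (xs : List Int) (r : Nat) :
    pvProdKX k xs (r + 1) = xs.flatMap (fun x => (pvProdKX k xs r).map (fun t => k :: x :: t)) := rfl

theorem pvProdKX_one (k : Int) (xs : List Int) :
    pvProdKX k xs 1 = xs.flatMap (fun x => [[k, x]]) := by
  simp [pvProdKX]

-- MAIN LEMMA, odd length: A's inner product scan (with i[:-1]) equals B's dfs
theorem pv_main_odd (enemy : List Int) (m k : Int)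
    (hk : k ∈ PySem.List.pyRange 1 m 1)
    (hodd : enemy.length % 2 = 1) :
    ∀ (c : Nat) (acc : List Int), acc.length + c = enemy.length / 2 →
      (pvProdKX k (PySem.List.pyRange 1 m 1) (c + 1)).findSome? (fun i =>
          if (acc.flatMap (fun x => [k, x]) ++ i.dropLast).sum = enemy.sum ∧
             (acc.flatMap (fun x => [k, x]) ++ i.dropLast).length = enemy.length ∧
             pvWinA (acc.flatMap (fun x => [k, x]) ++ i.dropLast) enemy
          then some (acc.flatMap (fun x => [k, x]) ++ i.dropLast) else none)
      = pvDfs enemy enemy.length k m c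
          (enemy.sum - ((enemy.length - enemy.length / 2 : Nat) : Int) * k - acc.sum) acc := by
  have hne : PySem.List.pyRange 1 m 1 ≠ [] := List.ne_nil_of_mem hk
  intro c
  induction c with
  | zero =>
    intro acc hlen
    rw [pvProdKX_one, pv_findSome?_flatMap]
    have hdrop : ∀ x : Int, ([k, x] : List Int).dropLast = [k] := fun _ => rfl
    have hsingle : ∀ x : Int,
        ([[k, x]] : List (List Int)).findSome? (fun i =>
          if (acc.flatMap (fun y => [k, y]) ++ i.dropLast).sum = enemy.sum ∧
             (acc.flatMap (fun y => [k, y]) ++ i.dropLast).length = enemy.length ∧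
             pvWinA (acc.flatMap (fun y => [k, y]) ++ i.dropLast) enemy
          then some (acc.flatMap (fun y => [k, y]) ++ i.dropLast) else none)
        = (if (acc.flatMap (fun y => [k, y]) ++ [k]).sum = enemy.sum ∧
             (acc.flatMap (fun y => [k, y]) ++ [k]).length = enemy.length ∧
             pvWinA (acc.flatMap (fun y => [k, y]) ++ [k]) enemy
          then some (acc.flatMap (fun y => [k, y]) ++ [k]) else none) := by
      intro x
      rw [pv_findSome?_singleton, hdrop x]
    rw [pv_findSome?_congr_mem (fun x _ => hsingle x), pv_findSome?_const_of_ne_nil hne]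
    have hb : (enemy.length % 2 == 1) = true := by simpa using hodd
    have hlen0 : acc.length = enemy.length / 2 := by omega
    have hnat : enemy.length - enemy.length / 2 = acc.length + 1 := by omega
    have hsum : (acc.flatMap (fun y => [k, y]) ++ [k]).sum
        = (acc.length : Int) * k + acc.sum + k := by
      simp [pv_flat_sum]
    have hlength : (acc.flatMap (fun y => [k, y]) ++ [k]).length = enemy.length := by
      rw [List.length_append, pv_flat_length]; simp; omega
    have hiff : ((acc.flatMap (fun y => [k, y]) ++ [k]).sum = enemy.sum)
        ↔ (enemy.sum - ((enemy.length - enemy.length / 2 : Nat) : Int) * k - acc.sum = 0) := by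
      rw [hsum, hnat]
      have hexp : (((acc.length + 1 : Nat)) : Int) * k = (acc.length : Int) * k + k := by
        push_cast
        ring
      rw [hexp]
      constructor <;> intro <;> linarith
    simp only [pvDfs, hb, pv_assemble_true, pv_winA_eq, decide_eq_true_eq]
    by_cases ht : enemy.sum - ((enemy.length - enemy.length / 2 : Nat) : Int) * k - acc.sum = 0
    · have hC := hiff.2 ht
      rw [if_pos ht]
      by_cases hw : 0 < ((acc.flatMap (fun y => [k, y]) ++ [k]).map (pvScore enemy)).sum
      · rw [if_pos ⟨hC, hlength, hw⟩, if_pos hw]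
      · rw [if_neg (fun h => hw h.2.2), if_neg hw]
    · rw [if_neg ht, if_neg (fun h => ht (hiff.1 h.1))]
  | succ c ih =>
    intro acc hlen
    rw [pvProdKX_succ, pv_findSome?_flatMap]
    have hinner : ∀ x ∈ PySem.List.pyRange 1 m 1,
        ((pvProdKX k (PySem.List.pyRange 1 m 1) (c + 1)).map (fun t => k :: x :: t)).findSome?
          (fun i =>
            if (acc.flatMap (fun y => [k, y]) ++ i.dropLast).sum = enemy.sum ∧
               (acc.flatMap (fun y => [k, y]) ++ i.dropLast).length = enemy.length ∧
               pvWinA (acc.flatMap (fun y => [k, y]) ++ i.dropLast) enemy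
            then some (acc.flatMap (fun y => [k, y]) ++ i.dropLast) else none)
        = pvDfs enemy enemy.length k m c
            ((enemy.sum - ((enemy.length - enemy.length / 2 : Nat) : Int) * k - acc.sum) - x)
            (acc ++ [x]) := by
      intro x hx
      rw [pv_findSome?_map]
      have hcong : ∀ t ∈ pvProdKX k (PySem.List.pyRange 1 m 1) (c + 1),
          (fun t : List Int =>
            if (acc.flatMap (fun y => [k, y]) ++ (k :: x :: t).dropLast).sum = enemy.sum ∧
               (acc.flatMap (fun y => [k, y]) ++ (k :: x :: t).dropLast).length = enemy.length ∧
               pvWinA (acc.flatMap (fun y => [k, y]) ++ (k :: x :: t).dropLast) enemy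
            then some (acc.flatMap (fun y => [k, y]) ++ (k :: x :: t).dropLast) else none) t
          = (fun t : List Int =>
            if ((acc ++ [x]).flatMap (fun y => [k, y]) ++ t.dropLast).sum = enemy.sum ∧
               ((acc ++ [x]).flatMap (fun y => [k, y]) ++ t.dropLast).length = enemy.length ∧
               pvWinA ((acc ++ [x]).flatMap (fun y => [k, y]) ++ t.dropLast) enemy
            then some ((acc ++ [x]).flatMap (fun y => [k, y]) ++ t.dropLast) else none) t := by
        intro t ht
        have htne : t ≠ [] := by
          intro h0
          have := pvProdKX_length ht
          rw [h0] at this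
          simp at this
        have hd : (k :: x :: t).dropLast = k :: x :: t.dropLast := by
          rw [List.dropLast_cons_of_ne_nil (by simp), List.dropLast_cons_of_ne_nil htne]
        have hres : acc.flatMap (fun y => [k, y]) ++ (k :: x :: t).dropLast
            = (acc ++ [x]).flatMap (fun y => [k, y]) ++ t.dropLast := by
          rw [hd]; simp
        simp only [hres]
      rw [pv_findSome?_congr_mem hcong]
      have := ih (acc ++ [x]) (by simp at hlen ⊢; omega)
      rw [this]
      congr 1
      simp
      ring
    rw [pv_findSome?_congr_mem hinner]
    exact pv_dfs_step enemy enemy.length k m c _ acc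

-- MAIN LEMMA, even length
theorem pv_main_even (enemy : List Int) (m k : Int)
    (heven : enemy.length % 2 = 0) :
    ∀ (c : Nat) (acc : List Int), acc.length + c = enemy.length / 2 →
      (pvProdKX k (PySem.List.pyRange 1 m 1) c).findSome? (fun i =>
          if (acc.flatMap (fun x => [k, x]) ++ i).sum = enemy.sum ∧
             (acc.flatMap (fun x => [k, x]) ++ i).length = enemy.length ∧
             pvWinA (acc.flatMap (fun x => [k, x]) ++ i) enemy
          then some (acc.flatMap (fun x => [k, x]) ++ i) else none)
      = pvDfs enemy enemy.length k m c
          (enemy.sum - ((enemy.length - enemy.length / 2 : Nat) : Int) * k - acc.sum) acc := by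
  intro c
  induction c with
  | zero =>
    intro acc hlen
    show ([([] : List Int)]).findSome? _ = _
    rw [pv_findSome?_singleton]
    have hb : (enemy.length % 2 == 1) = false := by simp [heven]
    have hlen0 : acc.length = enemy.length / 2 := by omega
    have hnat : enemy.length - enemy.length / 2 = acc.length := by omega
    have hsum : (acc.flatMap (fun y => [k, y])).sum
        = (acc.length : Int) * k + acc.sum := pv_flat_sum k acc
    have hlength : (acc.flatMap (fun y => [k, y])).length = enemy.length := by
      rw [pv_flat_length]; omega
    have hiff : ((acc.flatMap (fun y => [k, y])).sum = enemy.sum)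
        ↔ (enemy.sum - ((enemy.length - enemy.length / 2 : Nat) : Int) * k - acc.sum = 0) := by
      rw [hsum, hnat]
      constructor <;> intro <;> linarith
    simp only [pvDfs, hb, pv_assemble_false, pv_winA_eq, decide_eq_true_eq, List.append_nil]
    by_cases ht : enemy.sum - ((enemy.length - enemy.length / 2 : Nat) : Int) * k - acc.sum = 0
    · have hC := hiff.2 ht
      rw [if_pos ht]
      by_cases hw : 0 < ((acc.flatMap (fun y => [k, y])).map (pvScore enemy)).sum
      · rw [if_pos ⟨hC, hlength, hw⟩, if_pos hw]
      · rw [if_neg (fun h => hw h.2.2), if_neg hw]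
    · rw [if_neg ht, if_neg (fun h => ht (hiff.1 h.1))]
  | succ c ih =>
    intro acc hlen
    rw [pvProdKX_succ, pv_findSome?_flatMap]
    have hinner : ∀ x ∈ PySem.List.pyRange 1 m 1,
        ((pvProdKX k (PySem.List.pyRange 1 m 1) c).map (fun t => k :: x :: t)).findSome?
          (fun i =>
            if (acc.flatMap (fun y => [k, y]) ++ i).sum = enemy.sum ∧
               (acc.flatMap (fun y => [k, y]) ++ i).length = enemy.length ∧
               pvWinA (acc.flatMap (fun y => [k, y]) ++ i) enemy
            then some (acc.flatMap (fun y => [k, y]) ++ i) else none)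
        = pvDfs enemy enemy.length k m c
            ((enemy.sum - ((enemy.length - enemy.length / 2 : Nat) : Int) * k - acc.sum) - x)
            (acc ++ [x]) := by
      intro x hx
      rw [pv_findSome?_map]
      have hcong : ∀ t ∈ pvProdKX k (PySem.List.pyRange 1 m 1) c,
          (fun t : List Int =>
            if (acc.flatMap (fun y => [k, y]) ++ (k :: x :: t)).sum = enemy.sum ∧
               (acc.flatMap (fun y => [k, y]) ++ (k :: x :: t)).length = enemy.length ∧
               pvWinA (acc.flatMap (fun y => [k, y]) ++ (k :: x :: t)) enemy
            then some (acc.flatMap (fun y => [k, y]) ++ (k :: x :: t)) else none) t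
          = (fun t : List Int =>
            if ((acc ++ [x]).flatMap (fun y => [k, y]) ++ t).sum = enemy.sum ∧
               ((acc ++ [x]).flatMap (fun y => [k, y]) ++ t).length = enemy.length ∧
               pvWinA ((acc ++ [x]).flatMap (fun y => [k, y]) ++ t) enemy
            then some ((acc ++ [x]).flatMap (fun y => [k, y]) ++ t) else none) t := by
        intro t ht
        have hres : acc.flatMap (fun y => [k, y]) ++ (k :: x :: t)
            = (acc ++ [x]).flatMap (fun y => [k, y]) ++ t := by
          simp
        simp only [hres]
      rw [pv_findSome?_congr_mem hcong]
      have := ih (acc ++ [x]) (by simp at hlen ⊢; omega)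
      rw [this]
      congr 1
      simp
      ring
    rw [pv_findSome?_congr_mem hinner]
    exact pv_dfs_step enemy enemy.length k m c _ acc

-- ===== VERDICT (by name: the statement is the Claim_ definition above) =====
theorem winning_die_spec : Claim_equal_winning_die := by
  intro enemy hdom hpre
  unfold Spec_winning_die winning_die winning_die_alt
  cases hmx : PySem.List.max? enemy (fun y => y) with
  | none =>
    exact absurd ((PySem.List.max?_eq_none_iff enemy (fun y => y)).mp hmx) hpre
  | some mx =>
    dsimp only
    congr 1
    apply pv_findSome?_congr_mem
    intro k hk
    rcases Nat.mod_two_eq_zero_or_one enemy.length with hpar | hpar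
    · have hnot : ¬ (enemy.length % 2 = 1) := by omega
      simp only [if_neg hnot]
      have H := pv_main_even enemy (if mx = 18 then mx + 1 else mx + 2) k hpar
        (enemy.length / 2) [] (by simp)
      simp only [List.flatMap_nil, List.nil_append, List.sum_nil, sub_zero] at H
      exact H
    · simp only [if_pos hpar]
      have H := pv_main_odd enemy (if mx = 18 then mx + 1 else mx + 2) k hk hpar
        (enemy.length / 2) [] (by simp)
      simp only [List.flatMap_nil, List.nil_append, List.sum_nil, sub_zero] at H
      exact H
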